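-- pv_equiv track=rewrite | github.com/vdrey/Project-Euler | Python/Problem 12/12Test.py | genTri
-- ===== SOURCE A (Python) =====
-- def genTri(terms): # This works
--     vals = []
--     n = 0
--     while len(vals) <= terms:
--         nextTerm = 0
--         for i in range(n+1):
--             nextTerm += i
--         vals.append(nextTerm)
--         n += 1
--     return vals
-- ===== SOURCE B (Python) =====
-- def genTri(terms):  # closed form: the n-th triangular number is n*(n+1)//2
--     return [n * (n + 1) // 2 for n in range(terms + 1)]
-- ===== Notes on version B (the rewrite author's own statement) =====
-- stated objective: faster
-- what changed: Replaced the while-loop with an inner summation loop by a single comprehension using the closed form n*(n+1)//2 per term.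
import Mathlib
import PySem

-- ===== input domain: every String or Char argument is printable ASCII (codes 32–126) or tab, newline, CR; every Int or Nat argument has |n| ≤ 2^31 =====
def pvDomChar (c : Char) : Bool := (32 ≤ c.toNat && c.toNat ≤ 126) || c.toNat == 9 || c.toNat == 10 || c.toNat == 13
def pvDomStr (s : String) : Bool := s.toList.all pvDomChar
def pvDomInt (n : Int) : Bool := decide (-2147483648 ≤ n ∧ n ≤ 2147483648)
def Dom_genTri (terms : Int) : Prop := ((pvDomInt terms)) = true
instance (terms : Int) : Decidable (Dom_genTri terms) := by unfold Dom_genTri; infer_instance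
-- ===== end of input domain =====

-- B replaces A's while-loop with an inner summation loop by one map over a range
-- using the closed form n*(n+1)//2 (objective: faster).

-- ===== PORT A =====
-- while len(vals) <= terms: nextTerm = sum of range(n+1); vals.append(nextTerm); n += 1
def genTriLoop (terms : Int) (vals : List Int) (n : Int) : List Int :=
  if h : (vals.length : Int) ≤ terms then
    let nextTerm := (PySem.List.pyRange 0 (n + 1) 1).foldl (· + ·) 0
    genTriLoop terms (vals ++ [nextTerm]) (n + 1)
  else vals
termination_by (terms + 1 - vals.length).toNat
decreasing_by simp; omega

def genTri (terms : Int) : List Int := genTriLoop terms [] 0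

-- ===== PORT B =====
def genTri_alt (terms : Int) : List Int :=
  (PySem.List.pyRange 0 (terms + 1) 1).map (fun n => PySem.Int.floordiv (n * (n + 1)) 2)

-- ===== PRECONDITION & SPEC =====
def Spec_genTri (terms : Int) (out : List Int) : Prop := out = genTri_alt terms
instance (terms : Int) (out : List Int) : Decidable (Spec_genTri terms out) := by unfold Spec_genTri; infer_instance

-- ===== CLAIM (what is proved, stated in full; the proofs are below) =====
def Claim_equal_genTri : Prop := ∀ (terms : Int), Dom_genTri terms → Spec_genTri terms (genTri terms)

-- ===== LEMMAS AND PROOFS =====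

-- sum 0 + 1 + … + n = n*(n+1)//2 (A's inner loop equals B's closed form)
theorem sum_pyRange_tri (n : Int) (hn : 0 ≤ n) :
    (PySem.List.pyRange 0 (n + 1) 1).foldl (· + ·) 0 = PySem.Int.floordiv (n * (n + 1)) 2 := by
  obtain ⟨k, rfl⟩ := Int.eq_ofNat_of_zero_le hn
  induction k with
  | zero => decide
  | succ m ih =>
    push_cast
    rw [PySem.List.pyRange_one_succ_right (by positivity), List.foldl_append]
    simp only [List.foldl_cons, List.foldl_nil]
    rw [ih (by positivity)]
    simp only [PySem.Int.floordiv]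
    rw [show ((m : Int) + 1) * ((m : Int) + 1 + 1) = (m : Int) * ((m : Int) + 1) + 2 * ((m : Int) + 1) by ring,
        Int.add_mul_fdiv_left _ _ (by norm_num : (2 : Int) ≠ 0)]

theorem genTriLoop_eq (terms : Int) : ∀ (fuel : Nat) (vals : List Int) (n : Int),
    0 ≤ n → (vals.length : Int) = n → fuel = (terms + 1 - n).toNat →
    genTriLoop terms vals n =
      vals ++ (PySem.List.pyRange n (terms + 1) 1).map (fun k => PySem.Int.floordiv (k * (k + 1)) 2) := by
  intro fuel
  induction fuel with
  | zero =>
    intro vals n hn hlen hfuel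
    rw [genTriLoop]
    rw [dif_neg (by omega)]
    rw [PySem.List.pyRange_one_eq_nil (by omega)]
    simp
  | succ m ih =>
    intro vals n hn hlen hfuel
    rw [genTriLoop]
    by_cases h : (vals.length : Int) ≤ terms
    · rw [dif_pos h]
      rw [ih (vals ++ [(PySem.List.pyRange 0 (n + 1) 1).foldl (· + ·) 0]) (n + 1)
            (by omega) (by simp; omega) (by omega)]
      rw [PySem.List.pyRange_one_cons (show n < terms + 1 by omega), List.map_cons,
          sum_pyRange_tri n hn, List.append_assoc, List.singleton_append]
    · rw [dif_neg h]
      rw [PySem.List.pyRange_one_eq_nil (by omega)]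
      simp

-- ===== VERDICT (by name: the statement is the Claim_ definition above) =====
theorem genTri_spec : Claim_equal_genTri := by
  intro terms _
  unfold Spec_genTri genTri genTri_alt
  exact genTriLoop_eq terms (terms + 1 - 0).toNat [] 0 le_rfl rfl rfl
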